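-- pv_equiv track=rewrite | github.com/Jellman86/YetAnother-WhosAtMyFeeder | backend/app/utils/classifier_labels.py | normalize_classifier_label
-- ===== SOURCE A (Python) =====
-- def normalize_classifier_label(label: str | None) -> str:
--     text = str(label or '').strip()
--     if not text:
--         return text
--
--     parts = [part for part in text.split('_') if part]
--     if len(parts) < 2 or not parts[0].isdigit():
--         return text
--
--     taxonomy_parts = parts[1:]
--
--     # Find the rightmost all-lowercase token — this is the species epithet.
--     # Scientific names follow the pattern: Genus species [subspecies ...].
--     # Common-name words appended after the scientific name always start with an
--     # uppercase letter, so the last all-lowercase token marks the species end.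
--     species_end = None
--     for idx in range(len(taxonomy_parts) - 1, -1, -1):
--         if taxonomy_parts[idx].islower():
--             species_end = idx
--             break
--
--     if species_end is None:
--         return text
--
--     # Walk left across any consecutive lowercase tokens (subspecies epithets).
--     species_start = species_end
--     while species_start > 0 and taxonomy_parts[species_start - 1].islower():
--         species_start -= 1
--
--     # The genus is the PascalCase token immediately before the lowercase run.
--     if species_start == 0 or not taxonomy_parts[species_start - 1][:1].isupper():
--         return text
--
--     genus_idx = species_start - 1
--     normalized = ' '.join(taxonomy_parts[genus_idx:species_end + 1]).strip()
--     return normalized or text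
-- ===== SOURCE B (Python) =====
-- def _drop_non_lower(xs):
--     while xs and not xs[0].islower():
--         xs = xs[1:]
--     return xs
--
--
-- def _take_lower(xs):
--     out = []
--     for t in xs:
--         if not t.islower():
--             break
--         out.append(t)
--     return out
--
--
-- def normalize_classifier_label(label):
--     text = str(label or '').strip()
--     if not text:
--         return text
--
--     parts = [part for part in text.split('_') if part]
--     if len(parts) < 2 or not parts[0].isdigit():
--         return text
--
--     # Work on the reversed taxonomy tokens: skip the trailing common-name
--     # words (not all-lowercase), take the maximal lowercase run (species +
--     # subspecies epithets, reversed), and the next token must be the genus.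
--     rev = list(reversed(parts[1:]))
--     tail = _drop_non_lower(rev)
--     if not tail:
--         return text
--
--     species_rev = _take_lower(tail)
--     rest = tail[len(species_rev):]
--     if not rest or not rest[0][:1].isupper():
--         return text
--
--     normalized = ' '.join([rest[0]] + species_rev[::-1]).strip()
--     return normalized or text
-- ===== Notes on version B (the rewrite author's own statement) =====
-- stated objective: alternative
-- what changed: Replaces A's three index-based scans (a reversed range() search for the rightmost lowercase token, a while-loop walking indices left, then an index slice) with an index-free structural decomposition: reverse the taxonomy token list, dropwhile the non-lowercase common-name words, takewhile the lowercase species run, and the next token must be the genus.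
import Mathlib
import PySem

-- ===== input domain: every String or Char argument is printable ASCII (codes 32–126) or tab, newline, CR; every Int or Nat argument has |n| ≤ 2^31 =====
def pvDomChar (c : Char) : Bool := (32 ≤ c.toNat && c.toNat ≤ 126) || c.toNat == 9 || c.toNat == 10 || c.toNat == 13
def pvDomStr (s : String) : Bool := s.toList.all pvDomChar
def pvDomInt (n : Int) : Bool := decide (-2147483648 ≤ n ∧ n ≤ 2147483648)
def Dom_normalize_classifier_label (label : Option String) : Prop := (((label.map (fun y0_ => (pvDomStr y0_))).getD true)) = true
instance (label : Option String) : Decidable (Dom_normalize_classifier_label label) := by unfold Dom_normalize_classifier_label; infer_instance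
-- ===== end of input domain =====

-- B reworks the species search as dropwhile/takewhile over the reversed taxonomy token
-- list instead of A's index scans (objective: alternative decomposition, same cost).

-- shared token predicates (exact ports of the Python string methods on the ASCII domain):
-- s.islower(): at least one cased (= ASCII letter) char and no uppercase char
def isLowTok (s : String) : Bool :=
  s.toList.any PySem.Chars.isalpha && s.toList.all (fun c => !PySem.Chars.isupper c)

-- s[:1].isupper(): first char exists and is uppercase ("".isupper() is False)
def headUpper (s : String) : Bool :=
  match s.toList with
  | [] => false
  | c :: _ => PySem.Chars.isupper c

-- ===== PORT A =====
-- the while loop 'while species_start > 0 and taxonomy_parts[species_start-1].islower(): species_start -= 1'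
def walkLeft (tp : List String) : Nat → Nat
  | 0 => 0
  | s + 1 => if isLowTok ((tp[s]?).getD "") then walkLeft tp s else s + 1

-- everything from the species_end search on (tp = taxonomy_parts)
def speciesFromParts (text : String) (tp : List String) : String :=
  -- 'for idx in range(len(tp)-1, -1, -1): if tp[idx].islower(): species_end = idx; break'
  match (PySem.List.pyRange ((tp.length : Int) - 1) (-1) (-1)).find?
          (fun idx => isLowTok ((PySem.List.pyGet? tp idx).getD "")) with
  | none => text
  | some e =>
    let st := walkLeft tp e.toNat
    if st = 0 || !headUpper ((PySem.List.pyGet? tp ((st : Int) - 1)).getD "") then text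
    else
      let normalized := PySem.Str.strip
        (PySem.Str.join " " (PySem.List.slice tp (some ((st : Int) - 1)) (some (e + 1))))
      if normalized = "" then text else normalized

def normalize_classifier_label (label : Option String) : String :=
  let text := PySem.Str.strip (label.getD "")
  if text = "" then text
  else
    -- split? is none only for sep = ""; sep is "_", so getD [] never fires
    let parts := ((PySem.Str.split? text "_").getD []).filter (fun p => p ≠ "")
    if parts.length < 2 || !PySem.Str.strIsdigit ((PySem.List.pyGet? parts 0).getD "") then text
    else
      speciesFromParts text (PySem.List.slice parts (some 1) none)

-- ===== PORT B =====
-- '_drop_non_lower': while xs and not xs[0].islower(): xs = xs[1:]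
def dropNonLower : List String → List String
  | [] => []
  | t :: r => if !isLowTok t then dropNonLower r else t :: r

-- '_take_lower': collect the leading all-lowercase tokens
def takeLower : List String → List String
  | [] => []
  | t :: r => if !isLowTok t then [] else t :: takeLower r

-- species extraction over the REVERSED taxonomy tokens
def speciesFromRev (text : String) (rev : List String) : String :=
  let tail := dropNonLower rev
  if tail = [] then text
  else
    let speciesRev := takeLower tail
    match tail.drop speciesRev.length with
    | [] => text
    | g :: _ =>
      if !headUpper g then text
      else
        let normalized := PySem.Str.strip (PySem.Str.join " " (g :: speciesRev.reverse))
        if normalized = "" then text else normalized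

def normalize_classifier_label_alt (label : Option String) : String :=
  let text := PySem.Str.strip (label.getD "")
  if text = "" then text
  else
    -- split? is none only for sep = ""; sep is "_", so getD [] never fires
    let parts := ((PySem.Str.split? text "_").getD []).filter (fun p => p ≠ "")
    if parts.length < 2 || !PySem.Str.strIsdigit ((PySem.List.pyGet? parts 0).getD "") then text
    else
      speciesFromRev text (PySem.List.slice parts (some 1) none).reverse

-- ===== PRECONDITION & SPEC =====
def Spec_normalize_classifier_label (label : Option String) (out : String) : Prop := out = normalize_classifier_label_alt label
instance (label : Option String) (out : String) : Decidable (Spec_normalize_classifier_label label out) := by unfold Spec_normalize_classifier_label; infer_instance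

-- ===== CLAIM (what is proved, stated in full; the proofs are below) =====
def Claim_equal_normalize_classifier_label : Prop := ∀ (label : Option String), Dom_normalize_classifier_label label → Spec_normalize_classifier_label label (normalize_classifier_label label)


-- ===== LEMMAS AND PROOFS =====

theorem takeLower_length_le (l : List String) : (takeLower l).length ≤ l.length := by
  induction l with
  | nil => simp [takeLower]
  | cons t r ih =>
    simp only [takeLower]
    split
    · simp
    · simpa using ih

theorem dropNonLower_length_le (l : List String) : (dropNonLower l).length ≤ l.length := by
  induction l with
  | nil => simp [dropNonLower]
  | cons t r ih =>
    simp only [dropNonLower]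
    split
    · exact le_trans ih (by simp)
    · simp

theorem dropNonLower_suffix (l : List String) : ∃ pre, l = pre ++ dropNonLower l := by
  induction l with
  | nil => exact ⟨[], rfl⟩
  | cons t r ih =>
    simp only [dropNonLower]
    split
    · obtain ⟨pre, hp⟩ := ih
      exact ⟨t :: pre, by simp [← hp]⟩
    · exact ⟨[], rfl⟩

theorem dropNonLower_head_low {l : List String} {h : String} {t : List String}
    (he : dropNonLower l = h :: t) : isLowTok h = true := by
  induction l with
  | nil => simp [dropNonLower] at he
  | cons a r ih =>
    simp only [dropNonLower] at he
    split at he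
    · exact ih he
    · cases he
      rename_i hb
      simpa using hb

theorem takeLower_eq_take (l : List String) : takeLower l = l.take (takeLower l).length := by
  induction l with
  | nil => simp [takeLower]
  | cons t r ih =>
    simp only [takeLower]
    split
    · simp
    · simpa using ih

theorem find_desc (tp : List String) : ∀ (k : Nat), k ≤ tp.length →
    (PySem.List.pyRange ((k : Int) - 1) (-1) (-1)).find?
      (fun idx => isLowTok ((PySem.List.pyGet? tp idx).getD ""))
    = (if (dropNonLower ((tp.take k).reverse)).length = 0 then none
       else some ((((dropNonLower ((tp.take k).reverse)).length - 1 : Nat)) : Int)) := by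
  intro k
  induction k with
  | zero =>
    intro _
    rw [PySem.List.pyRange_neg_one_eq_nil (by norm_num)]
    simp [dropNonLower]
  | succ k ih =>
    intro hk
    have hklt : k < tp.length := hk
    have hcons : ((k + 1 : Nat) : Int) - 1 = (k : Int) := by push_cast; ring
    rw [hcons, PySem.List.pyRange_neg_one_cons (by omega)]
    have hget : PySem.List.pyGet? tp (k : Int) = some tp[k] := by
      rw [PySem.List.pyGet?_natCast]
      simp [List.getElem?_eq_getElem hklt]
    have htake : (tp.take (k + 1)).reverse = tp[k] :: (tp.take k).reverse := by
      rw [List.take_add_one]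
      simp [List.getElem?_eq_getElem hklt]
    rw [htake]
    by_cases hp : isLowTok tp[k] = true
    · have hlen : (tp.take k).length = k := List.length_take_of_le (le_of_lt hklt)
      rw [List.find?_cons_of_pos (by simp [hget, hp])]
      simp only [dropNonLower, hp]
      simp [hlen]
    · rw [List.find?_cons_of_neg (by simp [hget, hp])]
      have : ((k : Int)) - 1 = ((k : Nat) : Int) - 1 := by norm_num
      rw [this, ih (le_of_lt hklt)]
      simp only [dropNonLower, hp]
      simp

theorem walk_eq (tp : List String) : ∀ (s : Nat), s ≤ tp.length →
    walkLeft tp s = s - (takeLower ((tp.take s).reverse)).length := by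
  intro s
  induction s with
  | zero => intro _; simp [walkLeft, takeLower]
  | succ s ih =>
    intro hs
    have hslt : s < tp.length := hs
    have htake : (tp.take (s + 1)).reverse = tp[s] :: (tp.take s).reverse := by
      rw [List.take_add_one]
      simp [List.getElem?_eq_getElem hslt]
    have hget : (tp[s]?).getD "" = tp[s] := by simp [List.getElem?_eq_getElem hslt]
    rw [htake]
    simp only [walkLeft, hget]
    by_cases hp : isLowTok tp[s] = true
    · rw [if_pos hp, ih (le_of_lt hslt)]
      have h1 : (takeLower ((tp.take s).reverse)).length ≤ s := by
        have := takeLower_length_le ((tp.take s).reverse)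
        simpa [List.length_take_of_le (le_of_lt hslt)] using this
      simp only [takeLower, hp, Bool.not_true, Bool.false_eq_true, if_false, List.length_cons]
      omega
    · rw [if_neg hp]
      simp only [takeLower]
      rw [if_pos (by simpa using hp)]
      simp

-- the core of both ports agree, for any token list tp and fallback text
theorem core_eq (text : String) (tp : List String) :
    speciesFromParts text tp = speciesFromRev text tp.reverse := by
  unfold speciesFromParts speciesFromRev
  rw [find_desc tp tp.length le_rfl]
  simp only [List.take_length]
  by_cases hnil : (dropNonLower tp.reverse).length = 0
  · rw [if_pos hnil]
    have hde : dropNonLower tp.reverse = [] := List.eq_nil_of_length_eq_zero hnil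
    simp [hde]
  · rw [if_neg hnil]
    obtain ⟨hh, dt, hDrop⟩ : ∃ h t, dropNonLower tp.reverse = h :: t := by
      cases hc : dropNonLower tp.reverse with
      | nil => rw [hc] at hnil; simp at hnil
      | cons a b => exact ⟨a, b, rfl⟩
    have hlow : isLowTok hh = true := dropNonLower_head_low hDrop
    obtain ⟨pre, hpre⟩ := dropNonLower_suffix tp.reverse
    rw [hDrop] at hpre
    have htp : tp = dt.reverse ++ [hh] ++ pre.reverse := by
      have h2 := congrArg List.reverse hpre
      simp only [List.reverse_reverse, List.reverse_append, List.reverse_cons] at h2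
      simpa [List.append_assoc] using h2
    have hdlen : dt.length + 1 ≤ tp.length := by
      have := dropNonLower_length_le tp.reverse
      rw [hDrop] at this
      simpa using this
    have hlen : (dropNonLower tp.reverse).length = dt.length + 1 := by rw [hDrop]; simp
    rw [hlen]
    have htoNat : (((dt.length + 1 - 1 : Nat)) : Int).toNat = dt.length := by simp
    have htakedt : tp.take dt.length = dt.reverse := by
      rw [htp]
      rw [List.append_assoc]
      exact List.take_left' (by simp)
    have hst : walkLeft tp dt.length = dt.length - (takeLower dt).length := by
      rw [walk_eq tp dt.length (by omega), htakedt, List.reverse_reverse]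
    have hmdt : (takeLower dt).length ≤ dt.length := takeLower_length_le dt
    -- B side: tail = hh :: dt, speciesRev = hh :: takeLower dt
    have hsr : takeLower (hh :: dt) = hh :: takeLower dt := by
      simp [takeLower, hlow]
    by_cases hrest : dt.drop (takeLower dt).length = []
    · -- the lowercase run reaches index 0: st = 0, B's rest is empty
      have hge : dt.length ≤ (takeLower dt).length := List.drop_eq_nil_iff.mp hrest
      have hst0 : walkLeft tp dt.length = 0 := by omega
      rw [hDrop]
      simp only [htoNat, hst0, hsr]
      simp [hrest]
    · obtain ⟨g, r2, hgr⟩ : ∃ g r2, dt.drop (takeLower dt).length = g :: r2 := by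
        cases hc : dt.drop (takeLower dt).length with
        | nil => exact absurd hc hrest
        | cons a b => exact ⟨a, b, rfl⟩
      have hdt : dt = dt.take (takeLower dt).length ++ g :: r2 := by
        rw [← hgr, List.take_append_drop]
      have htk : takeLower dt = dt.take (takeLower dt).length := takeLower_eq_take dt
      have hr2 : r2.length = dt.length - (takeLower dt).length - 1 := by
        have := congrArg List.length hdt
        simp [List.length_take_of_le hmdt] at this
        omega
      have hmlt : (takeLower dt).length < dt.length := by
        have := congrArg List.length hdt
        simp [List.length_take_of_le hmdt] at this
        omega
      have hstv : walkLeft tp dt.length = dt.length - (takeLower dt).length := hst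
      have hstpos : walkLeft tp dt.length ≠ 0 := by omega
      -- flat decomposition of tp around the genus token g
      have htp2 : tp = r2.reverse ++ [g] ++ (takeLower dt).reverse ++ [hh] ++ pre.reverse := by
        rw [htp]
        conv_lhs => rw [hdt]
        rw [← htk]
        simp [List.reverse_append, List.append_assoc]
      have hdropst : tp.drop (walkLeft tp dt.length - 1) =
          g :: ((takeLower dt).reverse ++ [hh] ++ pre.reverse) := by
        have hlenr2 : walkLeft tp dt.length - 1 = r2.length := by omega
        rw [hlenr2, htp2]
        rw [List.append_assoc, List.append_assoc, List.append_assoc]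
        rw [List.drop_left' (by simp)]
        simp
      have hget : (PySem.List.pyGet? tp ((walkLeft tp dt.length : Int) - 1)).getD "" = g := by
        have hcast : ((walkLeft tp dt.length : Int) - 1) = ((walkLeft tp dt.length - 1 : Nat) : Int) := by
          omega
        rw [hcast, PySem.List.pyGet?_natCast, ← List.head?_drop, hdropst]
        rfl
      have hslice : PySem.List.slice tp (some ((walkLeft tp dt.length : Int) - 1))
            (some ((((dt.length + 1 - 1 : Nat)) : Int) + 1)) =
          g :: ((takeLower dt).reverse ++ [hh]) := by
        have h1 : (0:Int) ≤ (walkLeft tp dt.length : Int) - 1 := by omega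
        have h2 : (0:Int) ≤ (((dt.length + 1 - 1 : Nat)) : Int) + 1 := by positivity
        rw [PySem.List.slice_toNat tp h1 h2]
        have ha : ((walkLeft tp dt.length : Int) - 1).toNat = walkLeft tp dt.length - 1 := by omega
        have hb : ((((dt.length + 1 - 1 : Nat)) : Int) + 1).toNat = dt.length + 1 := by omega
        rw [ha, hb, hdropst]
        have hcnt : dt.length + 1 - (walkLeft tp dt.length - 1) = (takeLower dt).length + 2 := by
          omega
        rw [hcnt]
        rw [List.take_succ_cons]
        exact congrArg _ (List.take_left' (by simp))
      rw [hDrop]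
      have hdec : (decide (walkLeft tp dt.length = 0) || !headUpper g) = (!headUpper g) := by
        simp [hstpos]
      simp only [htoNat, hsr, hget, hslice, hdec, List.length_cons, List.drop_succ_cons, hgr]
      by_cases hup : headUpper g = true
      · simp [hup, List.reverse_cons]
      · simp [hup]

-- ===== VERDICT (by name: the statement is the Claim_ definition above) =====
theorem normalize_classifier_label_spec : Claim_equal_normalize_classifier_label := by
  unfold Claim_equal_normalize_classifier_label
  intro label _
  unfold Spec_normalize_classifier_label
  simp only [normalize_classifier_label, normalize_classifier_label_alt]
  split
  · rfl
  · split
    · rfl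
    · exact core_eq _ _
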